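-- pv_equiv track=rewrite | github.com/ZAKHAROVALOVE/Python_codes | Filling the list with cubes of numbers.py | generate_cube_numbers
-- ===== SOURCE A (Python) =====
-- from typing import Generator
--
-- def generate_cube_numbers(end: int) -> Generator[int, None, None]:
--     """
--     Генерція числа кубів, починаючи від 2 до вказаної величини.
--     """
--     assert end >= 2, "End must be 2 or greater"
--
--     num = 2
--     while True:
--         cube = num ** 3
--         if cube > end:
--             return
--         yield cube
--         num += 1
-- ===== SOURCE B (Python) =====
-- def generate_cube_numbers(end):
--     """Same sequence, but the stop bound is precomputed as an exact integer
--     cube root (binary search), so the loop body has no cube-vs-end test."""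
--     assert end >= 2, "End must be 2 or greater"
--     lo, hi = 1, end
--     while lo < hi:
--         mid = (lo + hi + 1) // 2
--         if mid * mid * mid <= end:
--             lo = mid
--         else:
--             hi = mid - 1
--     for i in range(2, lo + 1):
--         yield i * i * i
-- ===== Notes on version B (the rewrite author's own statement) =====
-- stated objective: alternative
-- what changed: B precomputes the largest r with r^3 <= end by integer binary search and then yields i*i*i over range(2, r+1), instead of A's unbounded while-True loop that tests cube > end each iteration.
import Mathlib
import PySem

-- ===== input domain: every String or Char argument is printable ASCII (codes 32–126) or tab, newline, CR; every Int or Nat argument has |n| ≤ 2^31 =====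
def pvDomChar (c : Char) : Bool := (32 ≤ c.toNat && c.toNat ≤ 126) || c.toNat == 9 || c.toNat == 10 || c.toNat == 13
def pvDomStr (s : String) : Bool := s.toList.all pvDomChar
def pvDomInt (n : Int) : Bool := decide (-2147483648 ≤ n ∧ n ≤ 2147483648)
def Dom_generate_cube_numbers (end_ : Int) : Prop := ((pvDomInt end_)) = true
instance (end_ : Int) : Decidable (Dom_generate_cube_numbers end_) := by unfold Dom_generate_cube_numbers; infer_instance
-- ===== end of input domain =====

-- B precomputes the stop bound (exact integer cube root by binary search) and maps over a
-- bounded range, instead of A's unbounded while-loop with a per-iteration cube > end test.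
-- Both are generators in Python; the ports list their yielded values.
-- (The Nat argument of each loop helper is only a fuel guard for totality; the callers pass
-- enough fuel that the guard is never the reason a recursion stops.)

-- ===== PORT A =====
-- the 'while True' loop: yields num ** 3 while it is ≤ end, counting num up from the start value
def pvCubeLoopA (end_ : Int) : Nat → Int → List Int
  | 0, _ => []
  | fuel + 1, num =>
    if num ^ 3 > end_ then []
    else num ^ 3 :: pvCubeLoopA end_ fuel (num + 1)

def generate_cube_numbers (end_ : Int) : List Int :=
  -- 'assert end >= 2' raises for end_ < 2: excluded by Pre_
  pvCubeLoopA end_ (max end_ 0 + 2).toNat 2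

-- ===== PORT B =====
-- binary search for the largest lo with lo*lo*lo ≤ end; the gap hi-lo shrinks every step
def pvCbrtSearch (end_ : Int) : Nat → Int → Int → Int
  | 0, lo, _ => lo
  | fuel + 1, lo, hi =>
    if lo < hi then
      let mid := PySem.Int.floordiv (lo + hi + 1) 2
      if mid * mid * mid ≤ end_ then pvCbrtSearch end_ fuel mid hi
      else pvCbrtSearch end_ fuel lo (mid - 1)
    else lo

def generate_cube_numbers_alt (end_ : Int) : List Int :=
  -- assert end >= 2 (raises outside Pre_), binary search on [1, end], then the bounded for-loop
  let r := pvCbrtSearch end_ (end_ - 1).toNat 1 end_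
  (PySem.List.pyRange 2 (r + 1) 1).map (fun i => i * i * i)

-- ===== PRECONDITION & SPEC =====
-- Pre_ excludes end_ < 2, where both Pythons raise AssertionError ('assert end >= 2')
def Pre_generate_cube_numbers (end_ : Int) : Prop := 2 ≤ end_
instance (end_ : Int) : Decidable (Pre_generate_cube_numbers end_) := by unfold Pre_generate_cube_numbers; infer_instance
def pvWitness_generate_cube_numbers : Int := (70)

def Spec_generate_cube_numbers (end_ : Int) (out : List Int) : Prop := out = generate_cube_numbers_alt end_
instance (end_ : Int) (out : List Int) : Decidable (Spec_generate_cube_numbers end_ out) := by unfold Spec_generate_cube_numbers; infer_instance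

-- ===== CLAIM (what is proved, stated in full; the proofs are below) =====
def Claim_equal_generate_cube_numbers : Prop := ∀ (end_ : Int), Dom_generate_cube_numbers end_ → Pre_generate_cube_numbers end_ → Spec_generate_cube_numbers end_ (generate_cube_numbers end_)

-- ===== LEMMAS AND PROOFS =====

-- cubing is strictly monotone on ℤ
theorem pv_cube_lt_cube {a b : Int} (h : a < b) : a * a * a < b * b * b := by
  nlinarith [sq_nonneg (a + b), sq_nonneg a, sq_nonneg b, sq_nonneg (a - b)]

-- the binary search returns the largest integer whose cube is ≤ end_ (fuel ≥ initial gap)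
theorem pvCbrtSearch_correct (end_ : Int) :
    ∀ (fuel : Nat) (lo hi : Int), (hi - lo).toNat ≤ fuel → lo ≤ hi →
      lo * lo * lo ≤ end_ → end_ < (hi + 1) * (hi + 1) * (hi + 1) →
      pvCbrtSearch end_ fuel lo hi * pvCbrtSearch end_ fuel lo hi * pvCbrtSearch end_ fuel lo hi ≤ end_ ∧
      end_ < (pvCbrtSearch end_ fuel lo hi + 1) * (pvCbrtSearch end_ fuel lo hi + 1) * (pvCbrtSearch end_ fuel lo hi + 1) := by
  intro fuel
  induction fuel with
  | zero =>
    intro lo hi hk hle hlo hhi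
    have : lo = hi := by omega
    subst this
    exact ⟨hlo, hhi⟩
  | succ k ih =>
    intro lo hi hk hle hlo hhi
    rw [pvCbrtSearch]
    by_cases hlt : lo < hi
    · rw [if_pos hlt]
      have e2 : PySem.Int.floordiv (lo + hi + 1) 2 = (lo + hi + 1) / 2 :=
        PySem.Int.floordiv_eq_ediv_of_pos (by norm_num)
      rw [e2]
      set mid := (lo + hi + 1) / 2 with hm
      have hb1 : lo < mid := by omega
      have hb2 : mid ≤ hi := by omega
      by_cases hcube : mid * mid * mid ≤ end_
      · rw [if_pos hcube]
        exact ih mid hi (by omega) (by omega) hcube hhi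
      · rw [if_neg hcube]
        have hmid : mid - 1 + 1 = mid := by omega
        exact ih lo (mid - 1) (by omega) (by omega) hlo (by rw [hmid]; omega)
    · rw [if_neg hlt]
      have : lo = hi := by omega
      subst this
      exact ⟨hlo, hhi⟩

-- A's loop from n is exactly the cubes over the range [n, r+1) when r is the cube-root bound
theorem pvCubeLoopA_eq_range (end_ r : Int)
    (h1 : r * r * r ≤ end_) (h2 : end_ < (r + 1) * (r + 1) * (r + 1)) :
    ∀ (fuel : Nat) (n : Int), r + 1 - n ≤ fuel →
      pvCubeLoopA end_ fuel n = (PySem.List.pyRange n (r + 1) 1).map (fun i => i * i * i) := by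
  intro fuel
  induction fuel with
  | zero =>
    intro n hf
    rw [pvCubeLoopA, PySem.List.pyRange_one_eq_nil (by omega)]
    rfl
  | succ k ih =>
    intro n hf
    rw [pvCubeLoopA]
    by_cases hstop : n ^ 3 > end_
    · rw [if_pos hstop]
      have hn : r < n := by
        by_contra hc
        push Not at hc
        have hle : n * n * n ≤ r * r * r := by
          rcases lt_or_eq_of_le hc with h | h
          · exact le_of_lt (pv_cube_lt_cube h)
          · subst h; exact le_refl _
        have : n ^ 3 ≤ end_ := by nlinarith
        omega
      rw [PySem.List.pyRange_one_eq_nil (by omega)]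
      rfl
    · rw [if_neg hstop]
      have hn : n ≤ r := by
        by_contra hc
        push Not at hc
        have hr1 : r + 1 ≤ n := by omega
        have hlt : end_ < n * n * n := by
          rcases lt_or_eq_of_le hr1 with h | h
          · exact lt_trans h2 (pv_cube_lt_cube h)
          · subst h; exact h2
        have : n ^ 3 ≤ end_ := by omega
        nlinarith
      rw [PySem.List.pyRange_one_cons (by omega : n < r + 1), List.map_cons,
        ih (n + 1) (by omega)]
      have hcube : n ^ 3 = n * n * n := by ring
      rw [hcube]

-- bounds on the cube root r needed to size A's fuel: 1 ≤ r ≤ end_ when 2 ≤ end_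
theorem pv_root_bounds (end_ r : Int) (hpre : 2 ≤ end_)
    (h1 : r * r * r ≤ end_) (h2 : end_ < (r + 1) * (r + 1) * (r + 1)) :
    1 ≤ r ∧ r ≤ end_ := by
  have hr1 : 1 ≤ r := by
    by_contra hc
    push Not at hc
    have : r + 1 ≤ 1 := by omega
    have hle : (r + 1) * (r + 1) * (r + 1) ≤ 1 * 1 * 1 := by
      rcases lt_or_eq_of_le this with h | h
      · exact le_of_lt (pv_cube_lt_cube h)
      · rw [h]
    omega
  exact ⟨hr1, by nlinarith⟩

-- ===== VERDICT (by name: the statement is the Claim_ definition above) =====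
theorem generate_cube_numbers_spec : Claim_equal_generate_cube_numbers := by
  intro end_ _ hpre
  unfold Spec_generate_cube_numbers generate_cube_numbers generate_cube_numbers_alt
  have hpre' : (2 : Int) ≤ end_ := hpre
  obtain ⟨h1, h2⟩ := pvCbrtSearch_correct end_ (end_ - 1).toNat 1 end_ (by omega) (by omega) (by omega) (by nlinarith)
  obtain ⟨hr1, hr2⟩ := pv_root_bounds end_ _ hpre' h1 h2
  exact pvCubeLoopA_eq_range end_ (pvCbrtSearch end_ (end_ - 1).toNat 1 end_) h1 h2 _ 2 (by omega)
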